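-- pv_equiv track=rewrite | github.com/zakaria2905/cryptographie | Cryptographie.py | createAlphaKey
-- ===== SOURCE A (Python) =====
-- def createAlphaKey(car):
--     #Fonction servant à retouner un alphabet de cryptage
--     car=car.upper()#Met le caractère en majuscule
--     alphabet="ABCDEFGHIJKLMNOPQRSTUVWXYZ"
--     id=alphabet.index(car)#Recherche dans l'alphabet la position du caractère
--     alphakey=""
--     for i in range(26):
--         alphakey+=(alphabet[id])#crée l'alphabet de cryptage
--         id=(id+1)%26
--     return alphakey
-- ===== SOURCE B (Python) =====
-- def createAlphaKey(car):
--     car = car.upper()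
--     alphabet = "ABCDEFGHIJKLMNOPQRSTUVWXYZ"
--     id = alphabet.index(car)
--     return alphabet[id:] + alphabet[:id]
-- ===== Notes on version B (the rewrite author's own statement) =====
-- stated objective: simpler
-- what changed: Replaces the 26-step accumulation loop with modular index arithmetic by a single closed-form slice concatenation alphabet[id:] + alphabet[:id].
import Mathlib
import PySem

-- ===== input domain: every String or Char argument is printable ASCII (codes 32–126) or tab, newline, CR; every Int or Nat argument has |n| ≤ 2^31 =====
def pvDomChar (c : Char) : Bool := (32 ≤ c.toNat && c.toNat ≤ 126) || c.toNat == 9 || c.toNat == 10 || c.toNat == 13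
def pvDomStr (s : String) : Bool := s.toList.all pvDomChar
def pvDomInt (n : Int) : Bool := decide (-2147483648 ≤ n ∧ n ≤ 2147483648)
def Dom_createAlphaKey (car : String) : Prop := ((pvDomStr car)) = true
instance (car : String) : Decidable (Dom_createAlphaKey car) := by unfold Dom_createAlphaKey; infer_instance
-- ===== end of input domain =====

-- B replaces A's 26-iteration append loop with a closed-form slice concatenation (simpler).

-- ===== PORT A =====
def createAlphaKey (car : String) : String :=
  let carU := PySem.Str.upper car
  let alphabet := "ABCDEFGHIJKLMNOPQRSTUVWXYZ"
  let id0 : Int := PySem.Str.find alphabet carU   -- alphabet.index(car); Pre_ ensures it does not raise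
  (((PySem.List.pyRange 0 26 1).foldl
      (fun (st : String × Int) _ =>
        (st.1.push ((PySem.Str.pyGet? alphabet st.2).getD 'A'), PySem.Int.mod (st.2 + 1) 26))
      ("", id0))).1

-- ===== PORT B =====
def createAlphaKey_alt (car : String) : String :=
  let carU := PySem.Str.upper car
  let alphabet := "ABCDEFGHIJKLMNOPQRSTUVWXYZ"
  let idx : Int := PySem.Str.find alphabet carU   -- alphabet.index(car); Pre_ ensures it does not raise
  PySem.Str.slice alphabet (some idx) none ++ PySem.Str.slice alphabet none (some idx)

-- ===== PRECONDITION & SPEC =====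
-- Pre_: car.upper() must occur as a substring of the alphabet; otherwise alphabet.index raises ValueError in both A and B.
def Pre_createAlphaKey (car : String) : Prop :=
  PySem.Str.isIn (PySem.Str.upper car) "ABCDEFGHIJKLMNOPQRSTUVWXYZ" = true
instance (car : String) : Decidable (Pre_createAlphaKey car) := by unfold Pre_createAlphaKey; infer_instance
def pvWitness_createAlphaKey : String := "g"

def Spec_createAlphaKey (car : String) (out : String) : Prop := out = createAlphaKey_alt car
instance (car : String) (out : String) : Decidable (Spec_createAlphaKey car out) := by unfold Spec_createAlphaKey; infer_instance

-- ===== CLAIM (what is proved, stated in full; the proofs are below) =====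
def Claim_equal_createAlphaKey : Prop := ∀ (car : String), Dom_createAlphaKey car → Pre_createAlphaKey car → Spec_createAlphaKey car (createAlphaKey car)

-- ===== LEMMAS AND PROOFS =====

-- ===== VERDICT (by name: the statement is the Claim_ definition above) =====
theorem createAlphaKey_spec : Claim_equal_createAlphaKey := by
  intro car _ hpre
  unfold Spec_createAlphaKey createAlphaKey createAlphaKey_alt
  simp only [PySem.Str.find_eq]
  set n : Int := PySem.Chars.find ("ABCDEFGHIJKLMNOPQRSTUVWXYZ" : String).toList (PySem.Str.upper car).toList with hn
  have hinf : (PySem.Str.upper car).toList <:+: ("ABCDEFGHIJKLMNOPQRSTUVWXYZ" : String).toList :=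
    (PySem.Str.isIn_iff_infix _ _).mp hpre
  have h0 : 0 ≤ n := by rw [hn]; exact (PySem.Chars.find_nonneg_iff _ _).mpr hinf
  have h26 : n ≤ 26 := by
    rw [hn]
    have := PySem.Chars.find_le_length ("ABCDEFGHIJKLMNOPQRSTUVWXYZ" : String).toList (PySem.Str.upper car).toList
    simpa using this
  have h25 : n ≤ 25 := by
    rcases lt_or_eq_of_le h26 with h | h
    · omega
    · exfalso
      have hspec := PySem.Chars.find_spec (s := ("ABCDEFGHIJKLMNOPQRSTUVWXYZ" : String).toList)
        (sub := (PySem.Str.upper car).toList) (by rw [← hn]; exact h0)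
      rw [← hn, h] at hspec
      obtain ⟨hpref, hmin⟩ := hspec
      have hd : (List.drop (26 : Int).toNat ("ABCDEFGHIJKLMNOPQRSTUVWXYZ" : String).toList) = [] := by decide
      rw [hd] at hpref
      have hnil : (PySem.Str.upper car).toList = [] := List.prefix_nil.mp hpref
      have := hmin 0 (by decide)
      rw [hnil] at this
      exact this (List.nil_prefix)
  clear hn hinf hpre
  interval_cases n <;> decide
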